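-- pv_equiv track=rewrite | github.com/Jay-davisphem/data-structures-journey | graphs/g-ds.py | find_adjacent_nodes
-- ===== SOURCE A (Python) =====
-- class Node(str):
--     ...
--
-- vertices = ['A', 'B', 'C', 'D', 'E']
--
-- edges = [
--     ['A', 'B'],
--     ['A', 'D'],
--     ['B', 'C'],
--     ['C', 'D'],
--     ['C', 'E'],
--     ['D', 'E']
-- ]
--
-- def find_adjacent_nodes(node: Node) -> list[Node]:
--     '''
--     Time: O(e)
--     Returns list of adjacent nodes and None if node does't exist in vertices
--     '''
--     if node not in vertices:
--         return None
--     adj_nodes = []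
--     for cur_node, adj in edges:
--         if node == cur_node:
--             adj_nodes.append(adj)
--         elif node == adj:
--             adj_nodes.append(cur_node)
--
--     return adj_nodes
-- ===== SOURCE B (Python) =====
-- class Node(str):
--     ...
--
-- vertices = ['A', 'B', 'C', 'D', 'E']
--
-- edges = [
--     ['A', 'B'],
--     ['A', 'D'],
--     ['B', 'C'],
--     ['C', 'D'],
--     ['C', 'E'],
--     ['D', 'E']
-- ]
--
-- def find_adjacent_nodes(node: Node) -> list[Node]:
--     if node not in vertices:
--         return None
--     adj = {}
--     for u, v in edges:
--         adj.setdefault(u, []).append(v)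
--         adj.setdefault(v, []).append(u)
--     return adj.get(node, [])
-- ===== Notes on version B (the rewrite author's own statement) =====
-- stated objective: idiomatic
-- what changed: B builds a full adjacency dict once from the edge list (appending each endpoint to the other's list) and answers by a single dict lookup, instead of A's per-query filtering scan with two comparison branches per edge.
import Mathlib
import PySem

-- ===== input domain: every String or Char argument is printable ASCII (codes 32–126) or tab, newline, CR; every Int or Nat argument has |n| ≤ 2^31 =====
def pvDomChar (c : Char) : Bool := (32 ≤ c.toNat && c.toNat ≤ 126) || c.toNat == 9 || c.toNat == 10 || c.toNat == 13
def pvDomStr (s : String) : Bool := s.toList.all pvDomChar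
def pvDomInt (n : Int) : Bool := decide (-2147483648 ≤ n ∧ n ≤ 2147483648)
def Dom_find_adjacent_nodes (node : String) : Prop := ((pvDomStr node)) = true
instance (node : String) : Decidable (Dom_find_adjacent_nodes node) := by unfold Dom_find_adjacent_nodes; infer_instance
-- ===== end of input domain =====

-- ===== PORT A =====
-- B builds an adjacency dict once from the edges and answers by one lookup (idiomatic re-decomposition).
def pvVertices : List String := ["A", "B", "C", "D", "E"]

def pvEdges : List (String × String) :=
  [("A", "B"), ("A", "D"), ("B", "C"), ("C", "D"), ("C", "E"), ("D", "E")]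

def find_adjacent_nodes (node : String) : Option (List String) :=
  if pvVertices.contains node then
    some (pvEdges.foldl (fun adj_nodes e =>
      if node == e.1 then adj_nodes ++ [e.2]
      else if node == e.2 then adj_nodes ++ [e.1]
      else adj_nodes) [])
  else none

-- ===== PORT B =====
def pvAdjDict : PySem.Dict String (List String) :=
  pvEdges.foldl (fun adj e =>
    let adj := adj.insert e.1 (adj.getD e.1 [] ++ [e.2])
    adj.insert e.2 (adj.getD e.2 [] ++ [e.1])) (PySem.Dict.empty)

def find_adjacent_nodes_alt (node : String) : Option (List String) :=
  if pvVertices.contains node then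
    some (pvAdjDict.getD node [])
  else none

-- ===== PRECONDITION & SPEC =====
def Spec_find_adjacent_nodes (node : String) (out : Option (List String)) : Prop := out = find_adjacent_nodes_alt node
instance (node : String) (out : Option (List String)) : Decidable (Spec_find_adjacent_nodes node out) := by unfold Spec_find_adjacent_nodes; infer_instance

-- ===== CLAIM (what is proved, stated in full; the proofs are below) =====
def Claim_equal_find_adjacent_nodes : Prop := ∀ (node : String), Dom_find_adjacent_nodes node → Spec_find_adjacent_nodes node (find_adjacent_nodes node)

-- ===== LEMMAS AND PROOFS =====

-- ===== VERDICT (by name: the statement is the Claim_ definition above) =====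
theorem find_adjacent_nodes_spec : Claim_equal_find_adjacent_nodes := by
  intro node _
  unfold Spec_find_adjacent_nodes find_adjacent_nodes find_adjacent_nodes_alt
  by_cases h : pvVertices.contains node
  · have hm : node ∈ pvVertices := by simpa using h
    fin_cases hm <;> decide
  · have hn : node ∉ pvVertices := by simpa using h
    simp [hn]
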